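-- pv_equiv track=rewrite | github.com/landfootball/Starts-Of-The-Week-Automation | tools/pickle_score.py | validate_position_stats
-- ===== SOURCE A (Python) =====
-- POSITION_DEFENSE_WEIGHTS: dict[str, dict[str, float]] = {
--     "QB": {
--         "opponent-passing-yards-per-game":      0.30,
--         "opponent-passing-touchdowns-per-game": 0.30,
--         "opponent-yards-per-pass-attempt":      0.20,
--         "sacks-per-game":                       0.10,
--         "interceptions-per-game":               0.10,
--     },
--     "RB": {
--         "opponent-rushing-yards-per-game":      0.30,
--         "opponent-rushing-touchdowns-per-game": 0.25,
--         "opponent-yards-per-rush-attempt":      0.20,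
--         "opponent-red-zone-scoring-pct":        0.15,
--         "opponent-points-per-game":             0.10,
--     },
--     "WR": {
--         "opponent-passing-yards-per-game":      0.30,
--         "opponent-passing-touchdowns-per-game": 0.30,
--         "opponent-completions-per-game":        0.20,
--         "opponent-red-zone-scoring-pct":        0.10,
--         "opponent-third-down-conversion-pct":   0.10,
--     },
--     "TE": {
--         "opponent-passing-yards-per-game":      0.30,
--         "opponent-passing-touchdowns-per-game": 0.30,
--         "opponent-completions-per-game":        0.20,
--         "opponent-red-zone-scoring-pct":        0.10,
--         "opponent-third-down-conversion-pct":   0.10,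
--     },
-- }
--
-- def validate_position_stats(stats_data: dict) -> list[str]:
--     """
--     Check that slugs in POSITION_DEFENSE_WEIGHTS exist in scraped data.
--     Returns a list of warning strings for any missing slugs.
--     Called at startup or after data refresh.
--     """
--     warnings: list[str] = []
--     all_slugs: set[str] = set()
--     for team, team_stats in stats_data.items():
--         if team == "_meta" or not isinstance(team_stats, dict):
--             continue
--         all_slugs.update(team_stats.keys())
--
--     for position, slug_weights in POSITION_DEFENSE_WEIGHTS.items():
--         for slug in slug_weights:
--             if slug not in all_slugs:
--                 warnings.append(
--                     f"Pickle Score ({position}): slug '{slug}' not found in scraped data"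
--                 )
--     return warnings
-- ===== SOURCE B (Python) =====
-- POSITION_DEFENSE_WEIGHTS: dict[str, dict[str, float]] = {
--     "QB": {
--         "opponent-passing-yards-per-game":      0.30,
--         "opponent-passing-touchdowns-per-game": 0.30,
--         "opponent-yards-per-pass-attempt":      0.20,
--         "sacks-per-game":                       0.10,
--         "interceptions-per-game":               0.10,
--     },
--     "RB": {
--         "opponent-rushing-yards-per-game":      0.30,
--         "opponent-rushing-touchdowns-per-game": 0.25,
--         "opponent-yards-per-rush-attempt":      0.20,
--         "opponent-red-zone-scoring-pct":        0.15,
--         "opponent-points-per-game":             0.10,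
--     },
--     "WR": {
--         "opponent-passing-yards-per-game":      0.30,
--         "opponent-passing-touchdowns-per-game": 0.30,
--         "opponent-completions-per-game":        0.20,
--         "opponent-red-zone-scoring-pct":        0.10,
--         "opponent-third-down-conversion-pct":   0.10,
--     },
--     "TE": {
--         "opponent-passing-yards-per-game":      0.30,
--         "opponent-passing-touchdowns-per-game": 0.30,
--         "opponent-completions-per-game":        0.20,
--         "opponent-red-zone-scoring-pct":        0.10,
--         "opponent-third-down-conversion-pct":   0.10,
--     },
-- }
--
--
-- def validate_position_stats(stats_data: dict) -> list[str]:
--     """No precomputed slug index: for each required slug, scan stats_data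
--     directly for a qualifying team that carries it."""
--     warnings: list[str] = []
--     for position, slug_weights in POSITION_DEFENSE_WEIGHTS.items():
--         for slug in slug_weights:
--             if not any(
--                 slug in team_stats
--                 for team, team_stats in stats_data.items()
--                 if team != "_meta" and isinstance(team_stats, dict)
--             ):
--                 warnings.append(
--                     f"Pickle Score ({position}): slug '{slug}' not found in scraped data"
--                 )
--     return warnings
-- ===== Notes on version B (the rewrite author's own statement) =====
-- stated objective: simpler
-- what changed: B drops A's precomputed all_slugs set and its index-building first pass, instead scanning stats_data directly per required slug with any(); the two-phase index-then-check structure disappears.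
import Mathlib
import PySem

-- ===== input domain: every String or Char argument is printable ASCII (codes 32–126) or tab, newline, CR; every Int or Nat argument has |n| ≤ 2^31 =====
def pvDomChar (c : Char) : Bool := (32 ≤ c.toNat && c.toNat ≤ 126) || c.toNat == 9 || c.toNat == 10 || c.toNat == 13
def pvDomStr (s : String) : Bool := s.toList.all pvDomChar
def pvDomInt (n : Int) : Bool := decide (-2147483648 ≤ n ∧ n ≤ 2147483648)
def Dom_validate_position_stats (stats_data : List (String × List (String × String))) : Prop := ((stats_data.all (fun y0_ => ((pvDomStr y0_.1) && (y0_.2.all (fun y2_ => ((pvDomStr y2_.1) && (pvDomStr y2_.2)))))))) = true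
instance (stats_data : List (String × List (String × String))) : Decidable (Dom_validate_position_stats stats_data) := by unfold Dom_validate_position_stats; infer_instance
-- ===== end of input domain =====

-- B replaces A's two-phase "build an all_slugs index, then check each slug" with a direct
-- per-slug any() scan over stats_data (objective: simpler — no index pass).
-- In the ported type every team_stats value is a dict, so A's isinstance(team_stats, dict)
-- test is always true and is not represented.
-- The float weight values of POSITION_DEFENSE_WEIGHTS are never read (only the slug keys,
-- in insertion order), so the constant is ported as position ↦ slug-key list.

def pvPDW : List (String × List String) :=
  [("QB", ["opponent-passing-yards-per-game", "opponent-passing-touchdowns-per-game",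
           "opponent-yards-per-pass-attempt", "sacks-per-game", "interceptions-per-game"]),
   ("RB", ["opponent-rushing-yards-per-game", "opponent-rushing-touchdowns-per-game",
           "opponent-yards-per-rush-attempt", "opponent-red-zone-scoring-pct",
           "opponent-points-per-game"]),
   ("WR", ["opponent-passing-yards-per-game", "opponent-passing-touchdowns-per-game",
           "opponent-completions-per-game", "opponent-red-zone-scoring-pct",
           "opponent-third-down-conversion-pct"]),
   ("TE", ["opponent-passing-yards-per-game", "opponent-passing-touchdowns-per-game",
           "opponent-completions-per-game", "opponent-red-zone-scoring-pct",
           "opponent-third-down-conversion-pct"])]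

-- the f-string
def pvMsg (position slug : String) : String :=
  "Pickle Score (" ++ position ++ "): slug '" ++ slug ++ "' not found in scraped data"

-- ===== PORT A =====
def validate_position_stats (stats_data : List (String × List (String × String))) : List String :=
  let all_slugs : PySem.Set String :=
    stats_data.foldl
      (fun s p => if p.1 == "_meta" then s else PySem.Set.update s (p.2.map Prod.fst))
      PySem.Set.empty
  pvPDW.foldl
    (fun warnings pw =>
      pw.2.foldl
        (fun warnings slug =>
          if PySem.Set.contains all_slugs slug then warnings
          else warnings ++ [pvMsg pw.1 slug])
        warnings)
    []

-- ===== PORT B =====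
-- 'any(slug in team_stats for team, team_stats in stats_data.items() if team != "_meta" ...)'
def pvHasSlug (stats_data : List (String × List (String × String))) (slug : String) : Bool :=
  stats_data.any (fun p => p.1 != "_meta" && p.2.any (fun kv => kv.1 == slug))

def validate_position_stats_alt (stats_data : List (String × List (String × String))) : List String :=
  pvPDW.foldl
    (fun warnings pw =>
      pw.2.foldl
        (fun warnings slug =>
          if pvHasSlug stats_data slug then warnings
          else warnings ++ [pvMsg pw.1 slug])
        warnings)
    []

-- ===== PRECONDITION & SPEC =====
def Spec_validate_position_stats (stats_data : List (String × List (String × String))) (out : List String) : Prop := out = validate_position_stats_alt stats_data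
instance (stats_data : List (String × List (String × String))) (out : List String) : Decidable (Spec_validate_position_stats stats_data out) := by unfold Spec_validate_position_stats; infer_instance

-- ===== CLAIM (what is proved, stated in full; the proofs are below) =====
def Claim_equal_validate_position_stats : Prop := ∀ (stats_data : List (String × List (String × String))), Dom_validate_position_stats stats_data → Spec_validate_position_stats stats_data (validate_position_stats stats_data)

-- ===== LEMMAS AND PROOFS =====

-- membership in A's accumulated slug set ↔ some qualifying team carries the slug
lemma contains_slug_fold (l : List (String × List (String × String)))
    (s : PySem.Set String) (x : String) :
    PySem.Set.contains
      (l.foldl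
        (fun s p => if p.1 == "_meta" then s else PySem.Set.update s (p.2.map Prod.fst)) s) x
      = (PySem.Set.contains s x || pvHasSlug l x) := by
  induction l generalizing s with
  | nil => simp [pvHasSlug]
  | cons p rest ih =>
    simp only [List.foldl_cons, pvHasSlug, List.any_cons]
    by_cases h : p.1 = "_meta"
    · rw [if_pos (by simp [h]), ih]
      simp [pvHasSlug, h]
    · rw [if_neg (by simp [h]), ih]
      have key : PySem.Set.contains (PySem.Set.update s (p.2.map Prod.fst)) x
          = (PySem.Set.contains s x || p.2.any (fun kv => kv.1 == x)) := by
        rw [Bool.eq_iff_iff]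
        simp only [PySem.Set.contains_iff, PySem.Set.mem_update, Bool.or_eq_true,
                   List.any_eq_true, List.mem_map, beq_iff_eq]
      have h' : (p.1 != "_meta" && (p.2.any fun kv => kv.1 == x))
          = (p.2.any fun kv => kv.1 == x) := by simp [bne, h]
      rw [key, h']
      simp [pvHasSlug, Bool.or_assoc]

-- ===== VERDICT (by name: the statement is the Claim_ definition above) =====
theorem validate_position_stats_spec : Claim_equal_validate_position_stats := by
  intro stats_data _
  unfold Spec_validate_position_stats validate_position_stats validate_position_stats_alt
  have hc : ∀ x, PySem.Set.contains
      (stats_data.foldl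
        (fun s p => if p.1 == "_meta" then s else PySem.Set.update s (p.2.map Prod.fst))
        PySem.Set.empty) x = pvHasSlug stats_data x := by
    intro x
    rw [contains_slug_fold]
    simp [PySem.Set.empty, PySem.Set.contains]
  simp only [hc]
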